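-- pv_equiv track=rewrite | github.com/LucasAFournier/predictris | scripts/distance_matrix.py | get_tetromino_indices
-- ===== SOURCE A (Python) =====
-- def get_tetromino_indices(tetromino_names: list) -> dict:
--     """Get start and end indices for each tetromino in the sorted list."""
--     indices = {}
--     current_tetromino = None
--     start_idx = 0
--
--     for i, tetromino in enumerate(tetromino_names):
--         if tetromino != current_tetromino:
--             if current_tetromino is not None:
--                 indices[current_tetromino] = (start_idx, i)
--             current_tetromino = tetromino
--             start_idx = i
--
--     # Add the last tetromino
--     if current_tetromino is not None:
--         indices[current_tetromino] = (start_idx, len(tetromino_names))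
--
--     return indices
-- ===== SOURCE B (Python) =====
-- def get_tetromino_indices(tetromino_names: list) -> dict:
--     """Get start and end indices for each tetromino in the sorted list."""
--     indices = {}
--     n = len(tetromino_names)
--     pos = 0
--     while pos < n:
--         name = tetromino_names[pos]
--         end = pos + 1
--         while end < n and tetromino_names[end] == name:
--             end += 1
--         indices[name] = (pos, end)
--         pos = end
--     return indices
-- ===== Notes on version B (the rewrite author's own statement) =====
-- stated objective: alternative
-- what changed: Replaces A's element-wise state machine (pending current name + start index carried across the enumerate loop, with a trailing flush) by a two-pointer run scanner: an outer while jumps from run start to run start, an inner while finds the run's end, and each run is recorded immediately.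
import Mathlib
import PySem

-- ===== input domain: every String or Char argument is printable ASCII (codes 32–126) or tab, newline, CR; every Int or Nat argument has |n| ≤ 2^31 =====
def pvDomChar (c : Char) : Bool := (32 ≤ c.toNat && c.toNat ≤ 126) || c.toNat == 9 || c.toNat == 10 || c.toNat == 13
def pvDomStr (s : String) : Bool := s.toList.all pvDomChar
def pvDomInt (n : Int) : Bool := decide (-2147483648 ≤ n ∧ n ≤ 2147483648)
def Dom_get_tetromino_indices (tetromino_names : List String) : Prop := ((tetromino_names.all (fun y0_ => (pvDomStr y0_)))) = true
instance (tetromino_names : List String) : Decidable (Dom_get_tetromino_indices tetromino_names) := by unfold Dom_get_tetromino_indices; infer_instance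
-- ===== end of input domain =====

-- B replaces A's element-wise state machine with a two-pointer run scanner (same O(n) cost, different decomposition); return value only.


-- ===== PORT A =====
-- one loop iteration of A: state = (indices, current_tetromino, start_idx), item = (i, tetromino)
def pvStepA (st : PySem.Dict String (Int × Int) × Option String × Int) (p : Int × String) :
    PySem.Dict String (Int × Int) × Option String × Int :=
  if some p.2 ≠ st.2.1 then
    (match st.2.1 with
     | some c => st.1.insert c (st.2.2, p.1)
     | none => st.1, some p.2, p.1)
  else st

def get_tetromino_indices (tetromino_names : List String) : List (String × Int × Int) :=
  let st := (PySem.List.enumerate tetromino_names 0).foldl pvStepA (PySem.Dict.empty, none, 0)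
  (match st.2.1 with
   | some c => st.1.insert c (st.2.2, (tetromino_names.length : Int))
   | none => st.1).items

-- ===== PORT B =====
-- outer while loop of Source B: scans the run starting at the head (inner while = takeWhile/dropWhile), records it, jumps past it
def pvScanB (d : PySem.Dict String (Int × Int)) (pos : Int) : List String → PySem.Dict String (Int × Int)
  | [] => d
  | x :: xs =>
      let endd : Int := pos + 1 + (xs.takeWhile (· == x)).length
      pvScanB (d.insert x (pos, endd)) endd (xs.dropWhile (· == x))
termination_by l => l.length
decreasing_by
  simpa using Nat.lt_succ_of_le (List.length_dropWhile_le (· == x) xs)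

def get_tetromino_indices_alt (tetromino_names : List String) : List (String × Int × Int) :=
  (pvScanB PySem.Dict.empty 0 tetromino_names).items

-- ===== PRECONDITION & SPEC =====
def Spec_get_tetromino_indices (tetromino_names : List String) (out : List (String × Int × Int)) : Prop := out = get_tetromino_indices_alt tetromino_names
instance (tetromino_names : List String) (out : List (String × Int × Int)) : Decidable (Spec_get_tetromino_indices tetromino_names out) := by unfold Spec_get_tetromino_indices; infer_instance

-- ===== CLAIM (what is proved, stated in full; the proofs are below) =====
def Claim_equal_get_tetromino_indices : Prop := ∀ (tetromino_names : List String), Dom_get_tetromino_indices tetromino_names → Spec_get_tetromino_indices tetromino_names (get_tetromino_indices tetromino_names)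

-- ===== LEMMAS AND PROOFS =====
theorem pv_takeWhile_replicate_append (c : String) (k : Nat) (l : List String) (h : l.takeWhile (· == c) = []) :
    ((List.replicate k c ++ l).takeWhile (· == c)) = List.replicate k c := by
  induction k with
  | zero => simpa using h
  | succ k ih => simp [List.replicate_succ, ih]

theorem pv_dropWhile_replicate_append (c : String) (k : Nat) (l : List String) (h : l.dropWhile (· == c) = l) :
    ((List.replicate k c ++ l).dropWhile (· == c)) = l := by
  induction k with
  | zero => simpa using h
  | succ k ih => simp [List.replicate_succ, ih]

-- one step of B's run scanner on an explicit run: the run at the front is consumed whole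
theorem pv_scan_run_nil (d : PySem.Dict String (Int × Int)) (s : Int) (c : String) (k : Nat) :
    pvScanB d s (List.replicate (k + 1) c) = d.insert c (s, s + (k + 1)) := by
  rw [List.replicate_succ, pvScanB.eq_def]
  have ht := pv_takeWhile_replicate_append c k [] (by simp)
  have hd := pv_dropWhile_replicate_append c k [] (by simp)
  simp only [List.append_nil] at ht hd
  simp only [ht, hd, List.length_replicate]
  rw [pvScanB.eq_def]
  simp only []
  rw [show s + 1 + (k : Int) = s + (↑k + 1) by ring]

theorem pv_scan_run_cons (d : PySem.Dict String (Int × Int)) (s : Int) (c x : String)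
    (rest : List String) (k : Nat) (hx : x ≠ c) :
    pvScanB d s (List.replicate (k + 1) c ++ x :: rest)
      = pvScanB (d.insert c (s, s + (k + 1))) (s + (k + 1)) (x :: rest) := by
  rw [List.replicate_succ, List.cons_append, pvScanB.eq_def]
  simp only [pv_takeWhile_replicate_append c k (x :: rest)
        (by simp [List.takeWhile_cons]; exact fun h => absurd h hx),
      pv_dropWhile_replicate_append c k (x :: rest)
        (by simp [List.dropWhile_cons]; exact fun h => absurd h hx),
      List.length_replicate]
  rw [show s + 1 + (k : Int) = s + (↑k + 1) by ring]

-- A's loop, started with an open run of c of length k+1 beginning at s (so the next index is s+(k+1)),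
-- finished by the trailing flush, equals B's run scanner on the remaining run plus the rest.
theorem pv_loop_eq (xs : List String) : ∀ (k : Nat) (c : String) (s : Int) (d : PySem.Dict String (Int × Int)),
    (let st := (PySem.List.enumerate xs (s + (k + 1))).foldl pvStepA (d, some c, s)
     match st.2.1 with
     | some c' => st.1.insert c' (st.2.2, s + (k + 1) + (xs.length : Int))
     | none => st.1)
    = pvScanB d s (List.replicate (k + 1) c ++ xs) := by
  induction xs with
  | nil =>
    intro k c s d
    simp only [PySem.List.enumerate_nil, List.foldl_nil, List.append_nil, List.length_nil,
      pv_scan_run_nil]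
    ring_nf
  | cons x rest ih =>
    intro k c s d
    by_cases hx : x = c
    · subst hx
      have hrep : List.replicate (k + 1) x ++ x :: rest = List.replicate (k + 1 + 1) x ++ rest := by
        simp [List.replicate_succ' (n := k + 1), List.append_assoc]
      rw [hrep, ← ih (k + 1) x s d]
      have harith : s + (↑k + 1) + 1 = s + (↑(k + 1) + 1) := by push_cast; ring
      simp only [PySem.List.enumerate_cons, List.foldl_cons, pvStepA, ne_eq,
        not_true_eq_false, harith]
      simp
      ring_nf
    · rw [pv_scan_run_cons d s c x rest k hx]
      have h1 := ih 0 x (s + (k + 1)) (d.insert c (s, s + (k + 1)))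
      simp only [Nat.cast_zero, zero_add, List.replicate_one, List.singleton_append] at h1
      rw [← h1]
      simp only [PySem.List.enumerate_cons, List.foldl_cons, pvStepA]
      have hne : some x ≠ some c := by simpa using hx
      simp only [ne_eq, hne, not_false_iff, if_pos]
      rw [show s + (↑k + 1) + ((x :: rest).length : Int) = s + (↑k + 1) + 1 + ↑rest.length by
        simp; ring]

theorem get_tetromino_indices_eq (tetromino_names : List String) :
    get_tetromino_indices tetromino_names = get_tetromino_indices_alt tetromino_names := by
  cases tetromino_names with
  | nil =>
    unfold get_tetromino_indices get_tetromino_indices_alt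
    rw [pvScanB.eq_def]
    rfl
  | cons x rest =>
    unfold get_tetromino_indices get_tetromino_indices_alt
    have h := pv_loop_eq rest 0 x 0 PySem.Dict.empty
    simp only [Nat.cast_zero, zero_add, List.replicate_one, List.singleton_append] at h
    simp only [PySem.List.enumerate_cons, List.foldl_cons, pvStepA]
    simp only [ne_eq, reduceCtorEq, not_false_iff, if_pos, zero_add]
    rw [show ((x :: rest).length : Int) = 1 + (rest.length : Int) by simp; ring]
    rw [h]

-- ===== VERDICT (by name: the statement is the Claim_ definition above) =====
theorem get_tetromino_indices_spec : Claim_equal_get_tetromino_indices := by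
  intro names _
  unfold Spec_get_tetromino_indices
  exact get_tetromino_indices_eq names
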